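-- pv_equiv track=rewrite | github.com/Uscera-Liberty/chislaki_2.0 | python_course/lab1.py | zadacha2
-- ===== SOURCE A (Python) =====
-- def zadacha2(n):
--     n = abs(n)
--     min_digit = 10
--     while n > 0:
--         d = n % 10
--         if d % 2 == 1 and d < min_digit:
--             min_digit = d
--         n //= 10
--     if min_digit == 10:
--         return -1
--     return min_digit
-- ===== SOURCE B (Python) =====
-- def zadacha2(n):
--     odds = [int(c) for c in str(abs(n)) if int(c) % 2 == 1]
--     return min(odds) if odds else -1
-- ===== Notes on version B (the rewrite author's own statement) =====
-- stated objective: idiomatic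
-- what changed: Replaces the arithmetic modulo/floor-division digit-extraction loop with its running minimum by a string traversal: str(abs(n)), a comprehension keeping the odd digits, and the built-in min.
import Mathlib
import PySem

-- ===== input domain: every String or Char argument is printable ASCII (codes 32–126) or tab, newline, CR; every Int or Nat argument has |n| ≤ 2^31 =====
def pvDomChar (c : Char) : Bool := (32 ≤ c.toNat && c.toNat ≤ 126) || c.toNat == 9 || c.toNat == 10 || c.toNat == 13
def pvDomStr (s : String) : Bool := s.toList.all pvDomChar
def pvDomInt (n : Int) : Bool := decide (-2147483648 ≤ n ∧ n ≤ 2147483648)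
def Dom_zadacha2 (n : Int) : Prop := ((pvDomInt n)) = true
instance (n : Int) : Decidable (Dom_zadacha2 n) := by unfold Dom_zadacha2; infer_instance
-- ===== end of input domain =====

-- B replaces A's arithmetic digit-extraction loop by string traversal of str(abs(n)) with min; equally fast, more idiomatic.

-- ===== PORT A =====
-- termination helper for the while-loop: n // 10 strictly shrinks for n > 0
theorem pvFloordivTen_lt (n : Int) (h : 0 < n) :
    (PySem.Int.floordiv n 10).toNat < n.toNat := by
  simp only [PySem.Int.floordiv, Int.fdiv_eq_ediv]
  have h1 : n / 10 < n := by omega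
  have h2 : 0 ≤ n / 10 := by positivity
  omega

def zadacha2Loop (n : Int) (min_digit : Int) : Int :=
  if h : 0 < n then
    let d := PySem.Int.mod n 10
    let md := if PySem.Int.mod d 2 == 1 && d < min_digit then d else min_digit
    zadacha2Loop (PySem.Int.floordiv n 10) md
  else min_digit
termination_by n.toNat
decreasing_by exact pvFloordivTen_lt n h

def zadacha2 (n : Int) : Int :=
  let m := |n|
  let min_digit := zadacha2Loop m 10
  if min_digit == 10 then -1 else min_digit

-- ===== PORT B =====
-- int(c) for a digit character c of str(abs(n)) is exactly its code minus 48
def pvDigitVal (c : Char) : Int := (c.toNat : Int) - 48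

def zadacha2_alt (n : Int) : Int :=
  let odds := ((PySem.Int.toChars |n|).filter
      (fun c => PySem.Int.mod (pvDigitVal c) 2 == 1)).map pvDigitVal
  if odds.isEmpty then -1
  else match PySem.List.min? odds (fun x => x) with
    | some m => m
    | none => -1

-- ===== PRECONDITION & SPEC =====
def Spec_zadacha2 (n : Int) (out : Int) : Prop := out = zadacha2_alt n
instance (n : Int) (out : Int) : Decidable (Spec_zadacha2 n out) := by unfold Spec_zadacha2; infer_instance

-- ===== CLAIM (what is proved, stated in full; the proofs are below) =====
def Claim_equal_zadacha2 : Prop := ∀ (n : Int), Dom_zadacha2 n → Spec_zadacha2 n (zadacha2 n)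

-- ===== LEMMAS AND PROOFS =====

-- A's loop over ↑m is a fold over the little-endian digit list
theorem loopA_eq_foldl (m : Nat) : ∀ acc : Int,
    zadacha2Loop (m : Int) acc =
      List.foldl (fun a d => if PySem.Int.mod d 2 == 1 && d < a then d else a) acc
        ((Nat.digits 10 m).map (fun d : Nat => (d : Int))) := by
  induction m using Nat.strong_induction_on with
  | _ m ih =>
    intro acc
    rcases Nat.eq_zero_or_pos m with h0 | hpos
    · subst h0
      rw [zadacha2Loop]
      simp
    · rw [zadacha2Loop]
      have hmod : PySem.Int.mod (m : Int) 10 = ((m % 10 : Nat) : Int) := by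
        simp only [PySem.Int.mod, Int.fmod_eq_emod]
        omega
      have hdiv : PySem.Int.floordiv (m : Int) 10 = ((m / 10 : Nat) : Int) := by
        simp only [PySem.Int.floordiv, Int.fdiv_eq_ediv]
        omega
      have hlt : m / 10 < m := Nat.div_lt_self hpos (by norm_num)
      rw [Nat.digits_def' (by norm_num : (1:Nat) < 10) hpos]
      simp only [List.map_cons, List.foldl_cons]
      have hc : (0 : Int) < (m : Int) := by exact_mod_cast hpos
      rw [dif_pos hc, hmod, hdiv, ih (m / 10) hlt]

-- the fold keeps even digits untouched and takes the min with odd ones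
theorem foldl_step_eq_min (l : List Int) : ∀ acc : Int,
    List.foldl (fun a d => if PySem.Int.mod d 2 == 1 && d < a then d else a) acc l =
      List.foldl min acc (l.filter (fun d => PySem.Int.mod d 2 == 1)) := by
  induction l with
  | nil => intro acc; rfl
  | cons d t ih =>
    intro acc
    simp only [List.foldl_cons, List.filter_cons]
    by_cases hodd : PySem.Int.mod d 2 == 1
    · rw [if_pos hodd, List.foldl_cons, ih]
      congr 1
      by_cases hlt : d < acc
      · rw [if_pos (by simp only [Bool.and_eq_true, decide_eq_true_eq]; exact ⟨hodd, hlt⟩),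
            min_eq_right (le_of_lt hlt)]
      · rw [if_neg (by simp only [Bool.and_eq_true, decide_eq_true_eq]; tauto),
            min_eq_left (by omega)]
    · rw [if_neg hodd, if_neg (by simp only [Bool.and_eq_true]; tauto)]
      exact ih acc

theorem foldl_min_comm (l : List Int) : ∀ x y : Int,
    List.foldl min (min x y) l = min x (List.foldl min y l) := by
  induction l with
  | nil => intro x y; rfl
  | cons a t ih =>
    intro x y
    simp only [List.foldl_cons, min_assoc]
    exact ih x (min y a)

theorem foldl_min_reverse (l : List Int) : ∀ x : Int,
    List.foldl min x l.reverse = List.foldl min x l := by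
  induction l with
  | nil => intro x; rfl
  | cons a t ih =>
    intro x
    simp only [List.reverse_cons, List.foldl_append, List.foldl_cons, List.foldl_nil, ih]
    rw [min_comm x a, foldl_min_comm t a x]
    exact min_comm _ _

theorem foldl_min_le_init (l : List Int) : ∀ x : Int, List.foldl min x l ≤ x := by
  induction l with
  | nil => intro x; simp
  | cons a t ih =>
    intro x
    calc List.foldl min (min x a) t ≤ min x a := ih _
    _ ≤ x := min_le_left _ _

-- Nat.toDigitsCore with enough fuel produces the big-endian digitChar list
theorem toDigitsCore_eq (n : Nat) : ∀ f ds, 0 < n → n < f →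
    Nat.toDigitsCore 10 f n ds = ((Nat.digits 10 n).map Nat.digitChar).reverse ++ ds := by
  induction n using Nat.strong_induction_on with
  | _ n ih =>
    intro f ds hpos hf
    match f with
    | 0 => omega
    | f + 1 =>
      rw [Nat.toDigitsCore]
      rw [Nat.digits_def' (by norm_num : (1:Nat) < 10) hpos]
      by_cases hz : n / 10 = 0
      · rw [if_pos hz, hz]
        simp
      · rw [if_neg hz]
        have hlt : n / 10 < n := Nat.div_lt_self hpos (by norm_num)
        rw [ih (n / 10) hlt f _ (Nat.pos_of_ne_zero hz) (by omega)]
        simp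

theorem toDigits_eq (n : Nat) (h : 0 < n) :
    Nat.toDigits 10 n = ((Nat.digits 10 n).map Nat.digitChar).reverse := by
  rw [Nat.toDigits, toDigitsCore_eq n (n + 1) [] h (by omega)]
  simp

theorem digitVal_digitChar (d : Nat) (h : d < 10) :
    pvDigitVal (Nat.digitChar d) = (d : Int) := by
  interval_cases d <;> decide

theorem odd_digitChar (d : Nat) (h : d < 10) :
    (PySem.Int.mod (pvDigitVal (Nat.digitChar d)) 2 == 1) = (PySem.Int.mod (d : Int) 2 == 1) := by
  rw [digitVal_digitChar d h]

-- bridge: B's filtered/mapped char list is the reversed odd-digit list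
theorem bridge (S : List Nat) (hS : ∀ d ∈ S, d < 10) :
    ((S.map Nat.digitChar).filter (fun c => PySem.Int.mod (pvDigitVal c) 2 == 1)).map pvDigitVal
      = (S.filter (fun d : Nat => PySem.Int.mod (d : Int) 2 == 1)).map (fun d : Nat => (d : Int)) := by
  induction S with
  | nil => rfl
  | cons d t ih =>
    have hd : d < 10 := hS d (by simp)
    have ht : ∀ x ∈ t, x < 10 := fun x hx => hS x (by simp [hx])
    simp only [List.map_cons, List.filter_cons, odd_digitChar d hd]
    by_cases hodd : (PySem.Int.mod (d : Int) 2 == 1) = true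
    · rw [if_pos hodd, if_pos hodd]
      simp only [List.map_cons, digitVal_digitChar d hd, ih ht]
    · rw [if_neg hodd, if_neg hodd]
      exact ih ht

-- ===== VERDICT (by name: the statement is the Claim_ definition above) =====
theorem zadacha2_spec : Claim_equal_zadacha2 := by
  intro n _
  unfold Spec_zadacha2
  show zadacha2 n = zadacha2_alt n
  simp only [zadacha2, zadacha2_alt]
  have habs : |n| = ((n.natAbs : Nat) : Int) := Int.abs_eq_natAbs n
  set m := n.natAbs with hm
  rcases Nat.eq_zero_or_pos m with h0 | hpos
  · rw [habs, h0, loopA_eq_foldl 0 10]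
    simp only [Nat.digits_zero, List.map_nil, List.foldl_nil]
    decide
  · have hchars : PySem.Int.toChars |n| = ((Nat.digits 10 m).map Nat.digitChar).reverse := by
      rw [habs, PySem.Int.toChars]
      rw [if_neg (by omega)]
      simp only [Int.toNat_natCast]
      exact toDigits_eq m hpos
    have hdlt : ∀ d ∈ Nat.digits 10 m, d < 10 :=
      fun d hd => Nat.digits_lt_base (by norm_num) hd
    set S := Nat.digits 10 m with hSdef
    have hOdds : ((PySem.Int.toChars |n|).filter
        (fun c => PySem.Int.mod (pvDigitVal c) 2 == 1)).map pvDigitVal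
        = ((S.filter (fun d : Nat => PySem.Int.mod (d : Int) 2 == 1)).map (fun d : Nat => (d : Int))).reverse := by
      rw [hchars, List.filter_reverse, List.map_reverse, bridge S hdlt]
    have hA : zadacha2Loop |n| 10 =
        List.foldl min 10 ((S.filter (fun d : Nat => PySem.Int.mod (d : Int) 2 == 1)).map (fun d : Nat => (d : Int))) := by
      rw [habs, loopA_eq_foldl m 10, foldl_step_eq_min, List.filter_map]
      rfl
    set O := (S.filter (fun d : Nat => PySem.Int.mod (d : Int) 2 == 1)).map (fun d : Nat => (d : Int)) with hO
    have hOlt : ∀ x ∈ O, x < 10 := by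
      intro x hx
      rw [hO] at hx
      simp only [List.mem_map, List.mem_filter] at hx
      obtain ⟨d, ⟨hd, _⟩, rfl⟩ := hx
      exact_mod_cast hdlt d hd
    rw [hOdds, hA]
    match hOe : O.reverse with
    | [] =>
      have : O = [] := by simpa using congrArg List.reverse hOe
      rw [this]
      simp
    | h :: t =>
      simp only [List.isEmpty_cons, if_neg (by simp : ¬(false = true)), PySem.List.min?_id_cons]
      have hh : h < 10 := hOlt h (by rw [← List.mem_reverse, hOe]; simp)
      have hval : List.foldl min 10 O = List.foldl min h t := by
        rw [← foldl_min_reverse, hOe, List.foldl_cons]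
        rw [min_eq_right (le_of_lt hh)]
      rw [hval]
      have hle : List.foldl min h t ≤ h := foldl_min_le_init t h
      rw [if_neg (by simp; omega)]
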